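-- pv_equiv track=rewrite | github.com/ChoiDevv/CodeTest | Python/Programmers/Level_0/q41 ~ q50/q47.py | solution
-- ===== SOURCE A (Python) =====
-- def solution(hp):
--     ant_attack = [5, 3, 1]
--     answer = 0
--
--     for attack in ant_attack:
--         if hp < 0:
--             return answer
--         answer += (hp // attack)
--         hp = hp % attack
--
--     return answer
-- ===== SOURCE B (Python) =====
-- # Ant counts for the five possible remainders after the 5-ants: precomputed table.
-- _REM_ANTS = (0, 1, 2, 1, 2)
--
-- def solution(hp):
--     if hp < 0:
--         return 0
--     return hp // 5 + _REM_ANTS[hp % 5]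
-- ===== Notes on version B (the rewrite author's own statement) =====
-- stated objective: simpler
-- what changed: Replaced the greedy loop over the divisor list (successive //3 and //1 on the running remainder) with a single division by 5 and a precomputed 5-entry lookup table giving the ant count for each possible remainder; the 3- and 1-divisions disappear.
import Mathlib
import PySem

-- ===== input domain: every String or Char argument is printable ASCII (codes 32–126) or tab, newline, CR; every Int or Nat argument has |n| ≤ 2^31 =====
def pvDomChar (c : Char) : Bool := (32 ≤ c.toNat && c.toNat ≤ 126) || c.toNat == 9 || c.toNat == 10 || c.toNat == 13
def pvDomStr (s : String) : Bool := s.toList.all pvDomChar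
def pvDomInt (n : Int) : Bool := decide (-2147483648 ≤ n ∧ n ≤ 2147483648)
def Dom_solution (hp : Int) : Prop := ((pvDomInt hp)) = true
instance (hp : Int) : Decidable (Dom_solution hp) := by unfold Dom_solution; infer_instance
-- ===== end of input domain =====

-- B replaces A's greedy loop over the divisor list with one division by 5 and a precomputed remainder table (simpler).


-- ===== PORT A =====
-- the for-loop with its early return, as structural recursion over the attack list
def solutionLoop : List Int → Int → Int → Int
  | [], _, answer => answer
  | attack :: rest, hp, answer =>
    if hp < 0 then answer
    else solutionLoop rest (PySem.Int.mod hp attack) (answer + PySem.Int.floordiv hp attack)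

def solution (hp : Int) : Int := solutionLoop [5, 3, 1] hp 0

-- ===== PORT B =====
-- Source B's table; tuple indexing hp % 5 is always in range (0..4), so the pyGet? is
-- always some and the .getD 0 default is never reached.
def remAnts : List Int := [0, 1, 2, 1, 2]

def solution_alt (hp : Int) : Int :=
  if hp < 0 then 0
  else PySem.Int.floordiv hp 5
       + (PySem.List.pyGet? remAnts (PySem.Int.mod hp 5)).getD 0

-- ===== PRECONDITION & SPEC =====
def Spec_solution (hp : Int) (out : Int) : Prop := out = solution_alt hp
instance (hp : Int) (out : Int) : Decidable (Spec_solution hp out) := by unfold Spec_solution; infer_instance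

-- ===== CLAIM (what is proved, stated in full; the proofs are below) =====
def Claim_equal_solution : Prop := ∀ (hp : Int), Dom_solution hp → Spec_solution hp (solution hp)

-- ===== LEMMAS AND PROOFS =====

theorem solution_eq_alt (hp : Int) : solution hp = solution_alt hp := by
  unfold solution solution_alt solutionLoop
  by_cases h : hp < 0
  · simp [h]
  · rw [not_lt] at h
    have h5 : PySem.Int.mod hp 5 = hp % 5 :=
      PySem.Int.mod_eq_emod_of_pos (show (0:Int) < 5 by norm_num)
    have hm5 : 0 ≤ hp % 5 := Int.emod_nonneg hp (by norm_num)
    have hlt5 : hp % 5 < 5 := Int.emod_lt_of_pos hp (by norm_num)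
    have h3 : PySem.Int.mod (hp % 5) 3 = hp % 5 % 3 :=
      PySem.Int.mod_eq_emod_of_pos (show (0:Int) < 3 by norm_num)
    have hm3 : 0 ≤ hp % 5 % 3 := Int.emod_nonneg _ (by norm_num)
    have hd3 : PySem.Int.floordiv (hp % 5) 3 = hp % 5 / 3 :=
      PySem.Int.floordiv_eq_ediv_of_pos (by norm_num)
    have hd1 : PySem.Int.floordiv (hp % 5 % 3) 1 = hp % 5 % 3 :=
      (PySem.Int.floordiv_eq_ediv_of_pos (show (0:Int) < 1 by norm_num)).trans (Int.ediv_one _)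
    simp only [solutionLoop, h5, h3, hd3, hd1, not_lt.mpr h, not_lt.mpr hm5, not_lt.mpr hm3,
      if_false]
    have : hp % 5 = 0 ∨ hp % 5 = 1 ∨ hp % 5 = 2 ∨ hp % 5 = 3 ∨ hp % 5 = 4 := by omega
    rcases this with h' | h' | h' | h' | h' <;>
      (rw [h']; simp [remAnts, PySem.List.pyGet?, PySem.List.pyIdx?]; try omega)

-- ===== VERDICT (by name: the statement is the Claim_ definition above) =====
theorem solution_spec : Claim_equal_solution := by
  intro hp _ ; exact solution_eq_alt hp
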